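-- pv_equiv track=rewrite | github.com/JuliaVKirillova/Algorithms | greedy algorithms.py | get_copy
-- ===== SOURCE A (Python) =====
-- def get_copy(n, centres):
--     counter = 0
--     while len(centres) != 1:
--         centres = sorted(centres, reverse=True)
--         if centres[-1] == 0:
--             centres = centres[:-1]
--             continue
--         centres[-1] -= 1
--         centres[0] -= 1
--         counter += 1
--
--     return counter
-- ===== SOURCE B (Python) =====
-- def get_copy(n, centres):
--     # Closed form: each operation removes one unit from the current max and one
--     # from the current min; the process supports exactly
--     # min(total // 2, total - max) operations before a single centre remains.
--     if len(centres) == 1: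
--         return 0
--     total = sum(centres)
--     return min(total // 2, total - max(centres))
-- ===== Notes on version B (the rewrite author's own statement) =====
-- stated objective: faster
-- what changed: Replaced the simulate-until-one-centre-left while loop (re-sorting the list on every iteration) by a one-pass closed form min(total // 2, total - max(centres)), with an early 0 for a single centre; intended as asymptotically faster — a timing run could not produce a ratio because A already times out at n=16 where B returns.
import Mathlib
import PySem

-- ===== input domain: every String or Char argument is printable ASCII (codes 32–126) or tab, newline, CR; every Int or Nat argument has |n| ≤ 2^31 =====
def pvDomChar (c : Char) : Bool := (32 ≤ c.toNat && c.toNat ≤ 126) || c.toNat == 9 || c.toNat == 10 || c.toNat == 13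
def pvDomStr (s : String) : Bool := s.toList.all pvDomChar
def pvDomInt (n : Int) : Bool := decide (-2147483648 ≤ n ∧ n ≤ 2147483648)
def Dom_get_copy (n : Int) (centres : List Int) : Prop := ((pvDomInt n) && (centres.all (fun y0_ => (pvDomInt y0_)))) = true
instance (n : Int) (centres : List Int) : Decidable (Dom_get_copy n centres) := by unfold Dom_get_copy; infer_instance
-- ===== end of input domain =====

-- B replaces A's simulate-until-one-left loop (which re-sorts every iteration) by the
-- closed form min(total // 2, total - max); intended as faster: a timing run got no
-- ratio because A already timed out at n=16 where B returned.


-- ===== PORT A =====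
-- helper: `c[-1] -= 1` on a nonempty list, i.e. replace the last element (hand port
-- of the index assignment; exact for a nonempty list)
def pvSetLast : List Int → Int → List Int
  | [], _ => []
  | [_], v => [v]
  | x :: y :: t, v => x :: pvSetLast (y :: t) v

-- termination measure of A's while loop: sum of the (clamped) values plus the length
def pvMeas (l : List Int) : Nat := (l.map Int.toNat).sum + l.length

-- the while loop of A (counter is the accumulator).  The Nat argument is a fuel
-- bound that merely makes the loop total: get_copy passes pvMeas centres + 1, and
-- the proofs show that much fuel is never exhausted when the Python loop terminates;
-- `[]` guards the IndexError Python raises on an empty list (outside Pre_get_copy).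
def pvLoopA : Nat → List Int → Int → Int
  | 0, _, counter => counter          -- fuel exhausted (unreachable under Pre_get_copy)
  | fuel + 1, centres, counter =>
    if centres.length = 1 then counter
    else
      match PySem.List.sorted centres (fun x => x) true with
      | [] => counter                 -- centres == []: Python raises IndexError
      | a :: t =>
        let b := (a :: t).getLast (List.cons_ne_nil a t)
        if b = 0 then
          pvLoopA fuel (PySem.List.slice (a :: t) none (some (-1))) counter
        else
          pvLoopA fuel ((a - 1) :: pvSetLast t (b - 1)) (counter + 1)

def get_copy (n : Int) (centres : List Int) : Int :=
  pvLoopA (pvMeas centres + 1) centres 0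

-- ===== PORT B =====
def get_copy_alt (n : Int) (centres : List Int) : Int :=
  if centres.length = 1 then 0
  else
    let total := centres.sum
    match PySem.List.max? centres (fun x => x) with
    | none => 0     -- max([]) raises ValueError in Python (outside Pre_get_copy)
    | some m => min (PySem.Int.floordiv total 2) (total - m)

-- ===== PRECONDITION & SPEC =====
-- Pre_ excludes the empty list (A raises IndexError) and lists of length ≥ 2 with a
-- negative entry (A's loop never terminates there: entries are only ever decremented,
-- so a negative entry can never reach the 0 that would remove it).
def Pre_get_copy (n : Int) (centres : List Int) : Prop :=
  centres ≠ [] ∧ (centres.length = 1 ∨ ∀ x ∈ centres, 0 ≤ x)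
instance (n : Int) (centres : List Int) : Decidable (Pre_get_copy n centres) := by
  unfold Pre_get_copy; infer_instance
def pvWitness_get_copy : Int × List Int := (0, [2, 1])

def Spec_get_copy (n : Int) (centres : List Int) (out : Int) : Prop := out = get_copy_alt n centres
instance (n : Int) (centres : List Int) (out : Int) : Decidable (Spec_get_copy n centres out) := by unfold Spec_get_copy; infer_instance

-- ===== CLAIM (what is proved, stated in full; the proofs are below) =====
def Claim_equal_get_copy : Prop := ∀ (n : Int) (centres : List Int), Dom_get_copy n centres → Pre_get_copy n centres → Spec_get_copy n centres (get_copy n centres)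

-- ===== LEMMAS AND PROOFS =====

theorem pvSetLast_eq : ∀ (t : List Int) (v : Int), t ≠ [] → pvSetLast t v = t.dropLast ++ [v]
  | [], _, h => absurd rfl h
  | [_], _, _ => rfl
  | x :: y :: t, v, _ => by
      simpa [pvSetLast] using pvSetLast_eq (y :: t) v (by simp)

theorem pvMeas_perm {l l' : List Int} (h : l.Perm l') : pvMeas l = pvMeas l' := by
  unfold pvMeas
  rw [(h.map Int.toNat).sum_eq, h.length_eq]

theorem pvMeas_append_singleton (u : List Int) (x : Int) :
    pvMeas (u ++ [x]) = pvMeas u + x.toNat + 1 := by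
  unfold pvMeas; simp; omega


-- the maximum of a nonempty list, as B's `max(centres)` computes it
def pvMax : List Int → Int
  | [] => 0
  | a :: t => t.foldl max a

theorem pvMax_spec (a : Int) (t : List Int) :
    pvMax (a :: t) ∈ a :: t ∧ ∀ x ∈ a :: t, x ≤ pvMax (a :: t) := by
  constructor
  · rcases PySem.List.foldl_max_mem t a with h | h
    · simp [pvMax, h]
    · simp [pvMax]; right; exact h
  · intro x hx
    rcases List.mem_cons.mp hx with rfl | hx
    · exact (PySem.List.le_foldl_max t x).1
    · exact (PySem.List.le_foldl_max t a).2 x hx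

theorem pvMax_unique (a : Int) (t : List Int) (m : Int)
    (hm : m ∈ a :: t) (hmax : ∀ x ∈ a :: t, x ≤ m) : pvMax (a :: t) = m := by
  obtain ⟨h1, h2⟩ := pvMax_spec a t
  exact le_antisymm (hmax _ h1) (h2 m hm)

-- the closed form, as a function of the list
def pvF (l : List Int) : Int := min (PySem.Int.floordiv l.sum 2) (l.sum - pvMax l)

theorem pvF_perm {l l' : List Int} (h : l.Perm l') (hne : l ≠ []) : pvF l = pvF l' := by
  obtain ⟨a, t, rfl⟩ := List.exists_cons_of_ne_nil hne
  have hne' : l' ≠ [] := fun he => (List.cons_ne_nil a t) (List.Perm.eq_nil (he ▸ h))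
  obtain ⟨a', t', rfl⟩ := List.exists_cons_of_ne_nil hne'
  have hmax : pvMax (a :: t) = pvMax (a' :: t') := by
    obtain ⟨h1, h2⟩ := pvMax_spec a' t'
    exact pvMax_unique a t _ (h.mem_iff.mpr h1) (fun x hx => h2 x (h.mem_iff.mp hx))
  unfold pvF
  rw [h.sum_eq, hmax]

-- key invariant: on a nonempty list of nonnegative centres the loop adds pvF to counter
theorem pvLoopA_eq (k : Nat) : ∀ (l : List Int) (counter : Int), pvMeas l ≤ k →
    l ≠ [] → (∀ x ∈ l, 0 ≤ x) → pvLoopA k l counter = counter + pvF l := by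
  induction k with
  | zero =>
    intro l counter hk hne _
    obtain ⟨a, t, rfl⟩ := List.exists_cons_of_ne_nil hne
    exfalso; unfold pvMeas at hk; simp at hk
  | succ k ih =>
    intro l counter hk hne hnn
    rw [pvLoopA]
    by_cases h1 : l.length = 1
    · -- single centre left: zero further operations, pvF = 0
      obtain ⟨a, t, rfl⟩ := List.exists_cons_of_ne_nil hne
      obtain rfl : t = [] := by simpa using h1
      have ha : 0 ≤ a := hnn a (by simp)
      have : pvF [a] = 0 := by
        unfold pvF pvMax
        rw [PySem.Int.floordiv_eq_ediv_of_pos (by omega)]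
        simp
        omega
      simp [h1, this]
    · simp only [h1, if_false]
      have hperm := PySem.List.sorted_perm l (fun x => x) true
      have hFs : pvF (PySem.List.sorted l (fun x => x) true) = pvF l :=
        pvF_perm hperm (by intro he; rw [he] at hperm; exact hne hperm.symm.eq_nil)
      split
      · -- sorted = []: impossible, l ≠ []
        next hs => exact absurd (by rw [hs] at hperm; exact hperm.symm.eq_nil) hne
      · next a t hs =>
        rw [hs] at hperm hFs
        have hlen : (a :: t).length = l.length := hperm.length_eq
        have ht : t ≠ [] := by
          rintro rfl; simp at hlen; omega
        have hnn' : ∀ x ∈ a :: t, 0 ≤ x := fun x hx => hnn x (hperm.mem_iff.mp hx)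
        have hpair : List.Pairwise (fun x y => y ≤ x) (a :: t) := by
          have := PySem.List.sorted_pairwise_rev l (fun x => x)
          rwa [hs] at this
        have hta : ∀ x ∈ t, x ≤ a := (List.pairwise_cons.mp hpair).1
        have hmeas : pvMeas (a :: t) = pvMeas l := pvMeas_perm hperm
        set b := (a :: t).getLast (List.cons_ne_nil a t) with hbdef
        have hbmem : b ∈ a :: t := List.getLast_mem _
        have hbnn : 0 ≤ b := hnn' b hbmem
        have hbt : b = t.getLast ht := List.getLast_cons ht
        have htsplit : t.dropLast ++ [t.getLast ht] = t := List.dropLast_append_getLast ht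
        have hmaxa : pvMax (a :: t) = a :=
          pvMax_unique a t a (by simp) (fun x hx => by
            rcases List.mem_cons.mp hx with rfl | hx
            · exact le_refl x
            · exact hta x hx)
        by_cases hb0 : b = 0
        · -- last element is 0: it is dropped; sum and max are unchanged
          simp only [hb0, if_true]
          have hsl : PySem.List.slice (a :: t) none (some (-1)) = (a :: t).dropLast := by
            simp [pysem]
          have hdl : (a :: t).dropLast = a :: t.dropLast := List.dropLast_cons_of_ne_nil ht
          have hmeas' : pvMeas (a :: t) = pvMeas (a :: t.dropLast) + 1 := by
            conv_lhs => rw [← htsplit, ← List.cons_append, pvMeas_append_singleton,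
              ← hbt, hb0]
            simp
          have := ih (a :: t.dropLast) counter (by omega)
            (List.cons_ne_nil a _)
            (fun x hx => by
              rcases List.mem_cons.mp hx with rfl | hx
              · exact hnn' x (by simp)
              · exact hnn' x (List.mem_cons_of_mem a (List.dropLast_sublist t |>.mem hx)))
          rw [hsl, hdl, this]
          congr 1
          rw [← hFs]
          unfold pvF
          have hsum : (a :: t).sum = (a :: t.dropLast).sum := by
            conv_lhs => rw [← htsplit, ← hbt, hb0]
            simp
          have hmax' : pvMax (a :: t.dropLast) = a :=
            pvMax_unique a _ a (by simp) (fun x hx => by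
              rcases List.mem_cons.mp hx with rfl | hx
              · exact le_refl x
              · exact hta x (List.dropLast_sublist t |>.mem hx))
          rw [hsum, hmaxa, hmax']
        · -- positive last element: both ends are decremented, one operation counted
          have hbpos : 1 ≤ b := by omega
          simp only [hb0, if_false]
          have hba : b ≤ a := by
            rcases List.mem_cons.mp hbmem with h | h
            · omega
            · exact hta b h
          have hset : pvSetLast t (b - 1) = t.dropLast ++ [b - 1] :=
            pvSetLast_eq t (b - 1) ht
          -- measure decreases
          have hmeas' : pvMeas ((a - 1) :: pvSetLast t (b - 1)) + 1 ≤ pvMeas (a :: t) := by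
            have e1 : pvMeas t = pvMeas t.dropLast + b.toNat + 1 := by
              conv_lhs => rw [← htsplit, pvMeas_append_singleton, ← hbt]
            have e2 : pvMeas ((a - 1) :: pvSetLast t (b - 1))
                = (a - 1).toNat + (pvMeas t.dropLast + (b - 1).toNat + 1) + 1 := by
              rw [hset, ← List.cons_append]
              unfold pvMeas; simp; omega
            have e3 : pvMeas (a :: t) = a.toNat + pvMeas t + 1 := by
              unfold pvMeas; simp; omega
            omega
          have hdnn : ∀ x ∈ (a - 1) :: pvSetLast t (b - 1), 0 ≤ x := by
            intro x hx
            rw [hset] at hx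
            rcases List.mem_cons.mp hx with rfl | hx
            · omega
            · rcases List.mem_append.mp hx with hx | hx
              · exact hnn' x (List.mem_cons_of_mem a (List.dropLast_sublist t |>.mem hx))
              · simp at hx; omega
          rw [ih _ (counter + 1) (by omega) (List.cons_ne_nil _ _) hdnn]
          have hS : ((a - 1) :: pvSetLast t (b - 1)).sum = (a :: t).sum - 2 := by
            rw [hset, ← List.cons_append]
            have : t.sum = t.dropLast.sum + b := by
              conv_lhs => rw [← htsplit, ← hbt]; simp
            simp [this]; ring
          have hdlnn : ∀ x ∈ t.dropLast, 0 ≤ x :=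
            fun x hx => hnn' x (List.mem_cons_of_mem a (List.dropLast_sublist t |>.mem hx))
          have hdla : ∀ x ∈ t.dropLast, x ≤ a :=
            fun x hx => hta x (List.dropLast_sublist t |>.mem hx)
          have hSa : t.dropLast.sum + a + b = (a :: t).sum := by
            have : t.sum = t.dropLast.sum + b := by
              conv_lhs => rw [← htsplit, ← hbt]; simp
            simp [this]; ring
          -- the max of the decremented list: a if a also occurs inside, else a - 1
          have hM : (pvMax ((a - 1) :: pvSetLast t (b - 1)) = a ∧ 2 * a + b ≤ (a :: t).sum)
              ∨ pvMax ((a - 1) :: pvSetLast t (b - 1)) = a - 1 := by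
            by_cases hca : a ∈ t.dropLast
            · left
              constructor
              · apply pvMax_unique
                · rw [hset, ← List.cons_append]
                  exact List.mem_cons_of_mem _ (List.mem_append_left _ hca)
                · intro x hx
                  rw [hset, ← List.cons_append] at hx
                  rcases List.mem_cons.mp hx with rfl | hx
                  · omega
                  · rcases List.mem_append.mp hx with hx | hx
                    · exact hdla x hx
                    · simp at hx; omega
              · have : a ≤ t.dropLast.sum := List.single_le_sum hdlnn a hca
                omega
            · right
              apply pvMax_unique
              · rw [hset, ← List.cons_append]; simp
              · intro x hx
                rw [hset, ← List.cons_append] at hx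
                rcases List.mem_cons.mp hx with rfl | hx
                · exact le_refl _
                · rcases List.mem_append.mp hx with hx | hx
                  · have h1 := hdla x hx
                    have h2 : x ≠ a := by intro he; exact hca (he ▸ hx)
                    omega
                  · simp at hx; omega
          -- arithmetic: pvF drops by exactly 1
          have hsnn : 0 ≤ (a :: t).sum := by
            have := List.single_le_sum hnn' a (by simp)
            have hs2 : ∀ x ∈ a :: t, (0:Int) ≤ x := hnn'
            exact List.sum_nonneg hs2
          rw [← hFs]
          unfold pvF
          rw [hmaxa, hS]
          rw [PySem.Int.floordiv_eq_ediv_of_pos (b := 2) (by omega),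
              PySem.Int.floordiv_eq_ediv_of_pos (b := 2) (by omega)]
          rcases hM with ⟨hM, hbound⟩ | hM <;> rw [hM] <;> omega

-- B's closed form agrees with pvF on a nonempty list
theorem alt_eq_pvF (n : Int) (a : Int) (t : List Int) (h1 : (a :: t).length ≠ 1) :
    get_copy_alt n (a :: t) = pvF (a :: t) := by
  unfold get_copy_alt pvF pvMax
  simp only [if_neg h1, PySem.List.max?_id_cons]

-- ===== VERDICT (by name: the statement is the Claim_ definition above) =====
theorem get_copy_spec : Claim_equal_get_copy := by
  intro n centres _ hpre
  obtain ⟨hne, hor⟩ := hpre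
  obtain ⟨a, t, rfl⟩ := List.exists_cons_of_ne_nil hne
  unfold Spec_get_copy get_copy
  by_cases h1 : (a :: t).length = 1
  · rw [pvLoopA]
    simp only [h1, if_true]
    unfold get_copy_alt
    simp only [h1, if_true]
  · have hnn : ∀ x ∈ a :: t, 0 ≤ x := by
      rcases hor with h | h
      · exact absurd h h1
      · exact h
    rw [pvLoopA_eq (pvMeas (a :: t) + 1) (a :: t) 0 (by omega) hne hnn,
        alt_eq_pvF n a t h1]
    simp
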